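-- pv_equiv track=rewrite | github.com/rtorralba/zxp2boriel | zxp2boriel.py | extract_sprite_attributes
-- ===== SOURCE A (Python) =====
-- def extract_sprite_attributes(attributes, row, col, sprite_width, total_cols_px):
--     """
--     Extracts attributes for a specific sprite.
--     attributes: flat list of all attribute values (row-major 8x8 blocks)
--     row: sprite grid row index
--     col: sprite grid col index
--     sprite_width: width of sprite in pixels
--     total_cols_px: total width of the image in pixels (inferred)
--     """
--     attr_data = []
--
--     # Dimensions in 8x8 blocks
--     sprite_blocks = sprite_width // 8
--     total_blocks_width = total_cols_px // 8
--
--     start_block_col = col * sprite_blocks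
--     start_block_row = row * sprite_blocks
--
--     for r in range(sprite_blocks):
--         for c in range(sprite_blocks):
--             # Calculate index in the flat attributes list
--             # The attributes are stored row by row of blocks
--             block_index = (start_block_row + r) * total_blocks_width + (start_block_col + c)
--
--             if block_index < len(attributes):
--                 attr_data.append(attributes[block_index])
--             else:
--                 attr_data.append(0)
--
--     return attr_data
-- ===== SOURCE B (Python) =====
-- def extract_sprite_attributes(attributes, row, col, sprite_width, total_cols_px):
--     sprite_blocks = sprite_width // 8
--     total_blocks_width = total_cols_px // 8
--     attr_data = []
--     for r in range(sprite_blocks):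
--         base = (row * sprite_blocks + r) * total_blocks_width + col * sprite_blocks
--         seg = attributes[base:base + sprite_blocks]
--         attr_data.extend(seg + [0] * (sprite_blocks - len(seg)))
--     return attr_data
-- ===== Notes on version B (the rewrite author's own statement) =====
-- stated objective: simpler
-- what changed: Replaces the inner per-element loop with bounds check by one slice per block row plus zero-padding of the missing tail.
-- outside the precondition, e.g. on extract_sprite_attributes([1, 2, 3, 4], -1, 0, 8, 8): A returns [4], B returns [0]; on extract_sprite_attributes([1, 2, 3, 4], -1, 0, 8, 16): A returns [3], B returns [3]
import Mathlib
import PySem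

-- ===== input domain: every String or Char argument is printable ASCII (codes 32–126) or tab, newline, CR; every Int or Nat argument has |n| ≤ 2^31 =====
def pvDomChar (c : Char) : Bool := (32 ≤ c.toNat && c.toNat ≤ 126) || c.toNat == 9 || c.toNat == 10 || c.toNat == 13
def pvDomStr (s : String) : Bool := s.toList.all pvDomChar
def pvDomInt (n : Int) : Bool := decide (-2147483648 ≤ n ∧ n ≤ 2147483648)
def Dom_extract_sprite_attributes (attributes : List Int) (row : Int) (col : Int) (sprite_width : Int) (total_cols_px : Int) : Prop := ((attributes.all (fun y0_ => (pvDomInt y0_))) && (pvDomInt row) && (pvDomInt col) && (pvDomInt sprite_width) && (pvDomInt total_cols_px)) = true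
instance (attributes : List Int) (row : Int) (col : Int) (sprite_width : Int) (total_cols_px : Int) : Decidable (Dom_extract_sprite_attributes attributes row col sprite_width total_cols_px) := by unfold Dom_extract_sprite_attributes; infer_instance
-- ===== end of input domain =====

-- B replaces the per-element inner loop (index + bounds check) by one slice per block
-- row plus zero-padding of the missing tail: simpler/plainer, same cost.

-- ===== PORT A =====
-- pyGetD's default 0 is only reached where Python's attributes[block_index] would
-- raise IndexError (block_index < -len); those inputs are outside Pre_.
def extract_sprite_attributes (attributes : List Int) (row : Int) (col : Int) (sprite_width : Int) (total_cols_px : Int) : List Int :=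
  let sprite_blocks := PySem.Int.floordiv sprite_width 8
  let total_blocks_width := PySem.Int.floordiv total_cols_px 8
  let start_block_col := col * sprite_blocks
  let start_block_row := row * sprite_blocks
  (PySem.List.pyRange 0 sprite_blocks 1).foldl (fun attr_data r =>
    (PySem.List.pyRange 0 sprite_blocks 1).foldl (fun attr_data c =>
      let block_index := (start_block_row + r) * total_blocks_width + (start_block_col + c)
      if block_index < PySem.List.len attributes then
        attr_data ++ [PySem.List.pyGetD attributes block_index 0]
      else
        attr_data ++ [0]) attr_data) []

-- ===== PORT B =====
def extract_sprite_attributes_alt (attributes : List Int) (row : Int) (col : Int) (sprite_width : Int) (total_cols_px : Int) : List Int :=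
  let sprite_blocks := PySem.Int.floordiv sprite_width 8
  let total_blocks_width := PySem.Int.floordiv total_cols_px 8
  (PySem.List.pyRange 0 sprite_blocks 1).foldl (fun attr_data r =>
    let base := (row * sprite_blocks + r) * total_blocks_width + col * sprite_blocks
    let seg := PySem.List.slice attributes (some base) (some (base + sprite_blocks))
    attr_data ++ (seg ++ List.replicate (sprite_blocks - PySem.List.len seg).toNat 0)) []

-- ===== PRECONDITION & SPEC =====
-- Pre_ excludes exactly the inputs on which some reachable block_index is negative, where
-- A's per-element Python indexing wraps around from the end of the list (or raises IndexError
-- below -len) — accidental behaviour that B's slice does not reproduce.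
def Pre_extract_sprite_attributes (attributes : List Int) (row : Int) (col : Int) (sprite_width : Int) (total_cols_px : Int) : Prop :=
  let sb := PySem.Int.floordiv sprite_width 8
  let tbw := PySem.Int.floordiv total_cols_px 8
  sb ≤ 0 ∨ 0 ≤ min (row * sb * tbw) ((row * sb + (sb - 1)) * tbw) + col * sb
instance (attributes : List Int) (row : Int) (col : Int) (sprite_width : Int) (total_cols_px : Int) : Decidable (Pre_extract_sprite_attributes attributes row col sprite_width total_cols_px) := by unfold Pre_extract_sprite_attributes; infer_instance

def pvWitness_extract_sprite_attributes : List Int × Int × Int × Int × Int := ([1, 2, 3, 4, 5, 6], 0, 1, 16, 24)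

def Spec_extract_sprite_attributes (attributes : List Int) (row : Int) (col : Int) (sprite_width : Int) (total_cols_px : Int) (out : List Int) : Prop := out = extract_sprite_attributes_alt attributes row col sprite_width total_cols_px
instance (attributes : List Int) (row : Int) (col : Int) (sprite_width : Int) (total_cols_px : Int) (out : List Int) : Decidable (Spec_extract_sprite_attributes attributes row col sprite_width total_cols_px out) := by unfold Spec_extract_sprite_attributes; infer_instance

-- ===== CLAIM (what is proved, stated in full; the proofs are below) =====
def Claim_equal_extract_sprite_attributes : Prop := ∀ (attributes : List Int) (row : Int) (col : Int) (sprite_width : Int) (total_cols_px : Int), Dom_extract_sprite_attributes attributes row col sprite_width total_cols_px → Pre_extract_sprite_attributes attributes row col sprite_width total_cols_px → Spec_extract_sprite_attributes attributes row col sprite_width total_cols_px (extract_sprite_attributes attributes row col sprite_width total_cols_px)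

-- ===== LEMMAS AND PROOFS =====

-- One block row: the per-element map of A's inner loop equals slice + zero padding (Nat form).
lemma pv_row_eq (xs : List Int) (a n : Nat) :
    (List.range n).map (fun k : Nat => if ((a : Int) + (k : Int) < (xs.length : Int)) then PySem.List.pyGetD xs ((a : Int) + (k : Int)) 0 else 0)
      = (xs.drop a).take n ++ List.replicate (n - ((xs.drop a).take n).length) 0 := by
  apply List.ext_getElem
  · simp [List.length_take]
  · intro k hk1 hk2
    simp only [List.length_map, List.length_range] at hk1
    have hcast : ((a : Int) + (k : Int)) = ((a + k : Nat) : Int) := by push_cast; ring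
    rw [List.getElem_map, List.getElem_range, hcast]
    by_cases h : a + k < xs.length
    · have hklen : k < ((xs.drop a).take n).length := by
        simp [List.length_take]; omega
      rw [if_pos (by exact_mod_cast h), PySem.List.pyGetD_natCast,
        List.getElem_append_left hklen, List.getElem_take, List.getElem_drop,
        List.getD_eq_getElem xs 0 h]
    · have hklen : ((xs.drop a).take n).length ≤ k := by
        simp [List.length_take]; omega
      rw [if_neg (by exact_mod_cast h), List.getElem_append_right hklen,
        List.getElem_replicate]

theorem extract_sprite_attributes_spec : Claim_equal_extract_sprite_attributes := by
  intro attributes row col sprite_width total_cols_px _ hpre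
  unfold Pre_extract_sprite_attributes at hpre
  unfold Spec_extract_sprite_attributes extract_sprite_attributes extract_sprite_attributes_alt
  simp only []
  set sb := PySem.Int.floordiv sprite_width 8 with hsbdef
  set tbw := PySem.Int.floordiv total_cols_px 8 with htbwdef
  simp only [] at hpre
  rcases (by omega : sb ≤ 0 ∨ 0 < sb) with hsb | hsb
  · rw [PySem.List.pyRange_one_eq_nil hsb]; rfl
  · have hmin : 0 ≤ min (row * sb * tbw) ((row * sb + (sb - 1)) * tbw) + col * sb := by
      rcases hpre with h | h
      · omega
      · exact h
    apply PySem.List.foldl_congr_mem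
    intro acc r hr
    obtain ⟨hr0, hrsb⟩ := PySem.List.mem_pyRange_one.mp hr
    have hb' : min (row * sb * tbw) ((row * sb + (sb - 1)) * tbw) ≤ (row * sb + r) * tbw := by
      rcases (by omega : tbw ≤ 0 ∨ 0 ≤ tbw) with h | h
      · exact le_trans (min_le_right _ _) (by nlinarith)
      · exact le_trans (min_le_left _ _) (by nlinarith)
    have hbase : 0 ≤ (row * sb + r) * tbw + col * sb := by linarith
    -- rewrite A's inner loop as acc ++ map
    have hmap : (PySem.List.pyRange 0 sb 1).foldl (fun attr_data c =>
        if (row * sb + r) * tbw + (col * sb + c) < PySem.List.len attributes then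
          attr_data ++ [PySem.List.pyGetD attributes ((row * sb + r) * tbw + (col * sb + c)) 0]
        else attr_data ++ [0]) acc
        = acc ++ (PySem.List.pyRange 0 sb 1).map (fun c =>
            if ((row * sb + r) * tbw + col * sb) + c < (attributes.length : Int) then
              PySem.List.pyGetD attributes (((row * sb + r) * tbw + col * sb) + c) 0 else 0) := by
      rw [PySem.List.foldl_congr_mem _ _ (fun attr_data c =>
            attr_data ++ [if ((row * sb + r) * tbw + col * sb) + c < (attributes.length : Int) then
              PySem.List.pyGetD attributes (((row * sb + r) * tbw + col * sb) + c) 0 else 0])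
          acc (by
            intro acc2 c _
            have harith : (row * sb + r) * tbw + (col * sb + c) = ((row * sb + r) * tbw + col * sb) + c := by ring
            rw [harith]
            simp only [PySem.List.len_eq]
            split <;> rfl)]
      exact PySem.List.foldl_append_singleton_eq_map _ _ _
    rw [hmap]
    congr 1
    -- now the per-row identity, in Nat form
    obtain ⟨nb, hnb⟩ : ∃ nb : Nat, (row * sb + r) * tbw + col * sb = (nb : Int) :=
      ⟨((row * sb + r) * tbw + col * sb).toNat, (Int.toNat_of_nonneg hbase).symm⟩
    obtain ⟨ns, hns⟩ : ∃ ns : Nat, sb = (ns : Int) := ⟨sb.toNat, (Int.toNat_of_nonneg (le_of_lt hsb)).symm⟩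
    rw [hnb, hns, PySem.List.slice_natCast_add]
    have hlen : ((ns : Int) - PySem.List.len (List.take ns (List.drop nb attributes))).toNat
        = ns - (List.take ns (List.drop nb attributes)).length := by
      have h1 : (List.take ns (List.drop nb attributes)).length ≤ ns := by
        simp [List.length_take]
      simp only [PySem.List.len_eq]
      omega
    rw [hlen, PySem.List.pyRange_one]
    rw [show ((ns : Int) - 0).toNat = ns by omega]
    have hrow' := pv_row_eq attributes nb ns
    simpa using hrow'
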